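-- pv_equiv track=rewrite | github.com/WildRaincoat/ABLS_exp | utils/common.py | is_symbol_or_digit_only
-- ===== SOURCE A (Python) =====
-- import unicodedata
--
-- def _is_whitespace_or_control_only(text: str) -> bool:
--     t = text or ""
--     if t == "":
--         return True
--     for ch in t:
--         cat = unicodedata.category(ch)
--         if not (cat.startswith("Z") or cat.startswith("C")):
--             return False
--     return True
--
-- def is_symbol_or_digit_only(text: str) -> bool:
--     """
--     Treat as 'symbols' if token contains NO Unicode Letter (L*),
--     EXCEPT tokens that are purely whitespace/control (Z*/C*), which we IGNORE:
--       - whitespace/control-only -> False  (not symbols, not language)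
--       - otherwise: no letters -> True
--     """
--     t = (text or "")
--     if t == "":
--         return False
--     if _is_whitespace_or_control_only(t):
--         return False
--     for ch in t:
--         if unicodedata.category(ch).startswith("L"):
--             return False
--     return True
-- ===== SOURCE B (Python) =====
-- import unicodedata
--
-- def is_symbol_or_digit_only(text: str) -> bool:
--     # Single pass: track whether we saw any non-whitespace/control char
--     # and whether we saw any letter; no helper, no second scan.
--     saw_non_wc = False
--     saw_letter = False
--     for ch in (text or ""):
--         cat = unicodedata.category(ch)
--         if not (cat.startswith("Z") or cat.startswith("C")):
--             saw_non_wc = True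
--         if cat.startswith("L"):
--             saw_letter = True
--     return saw_non_wc and not saw_letter
-- ===== Notes on version B (the rewrite author's own statement) =====
-- stated objective: simpler
-- what changed: Replaced A's helper plus up-to-three scans (emptiness check, whitespace/control-only scan, letter scan with early returns) by one fold over the characters accumulating two booleans, returning saw_non_wc and not saw_letter.
import Mathlib
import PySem

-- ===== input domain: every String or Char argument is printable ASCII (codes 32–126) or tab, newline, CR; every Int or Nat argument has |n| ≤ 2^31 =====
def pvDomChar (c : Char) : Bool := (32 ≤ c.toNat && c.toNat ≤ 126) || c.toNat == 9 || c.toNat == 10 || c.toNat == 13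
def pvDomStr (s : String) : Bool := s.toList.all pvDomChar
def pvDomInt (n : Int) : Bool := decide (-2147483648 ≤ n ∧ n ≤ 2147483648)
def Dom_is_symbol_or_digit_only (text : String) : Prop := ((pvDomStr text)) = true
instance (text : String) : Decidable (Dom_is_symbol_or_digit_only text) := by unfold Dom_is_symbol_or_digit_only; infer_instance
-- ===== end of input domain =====

-- B merges A's helper and its three sequential scans into one fold keeping two booleans (objective: simpler).

-- ===== PORT A =====
-- unicodedata.category(ch).startswith("Z"): on the Dom (printable ASCII + tab/newline/CR) exactly the space (Zs)
def pvCatZ (c : Char) : Bool := c = ' '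
-- …startswith("C"): on the Dom exactly tab/newline/CR (Cc)
def pvCatC (c : Char) : Bool := c = '\t' || c = '\n' || c = '\r'
-- …startswith("L"): on the Dom exactly the ASCII letters (Lu/Ll)
def pvCatL (c : Char) : Bool := c.isAlpha

-- the helper's for-loop with early return
def pvWcLoop : List Char → Bool
  | [] => true
  | c :: rest => if !(pvCatZ c || pvCatC c) then false else pvWcLoop rest

def pv_is_whitespace_or_control_only (text : String) : Bool :=
  if text = "" then true else pvWcLoop text.toList

-- A's final for-loop with early return
def pvLetterLoop : List Char → Bool
  | [] => true
  | c :: rest => if pvCatL c then false else pvLetterLoop rest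

def is_symbol_or_digit_only (text : String) : Bool :=
  if text = "" then false
  else if pv_is_whitespace_or_control_only text then false
  else pvLetterLoop text.toList

-- ===== PORT B =====
-- same exact ASCII readings of the categories, B-side names
def pvAltWc (c : Char) : Bool := c = ' ' || (c = '\t' || c = '\n' || c = '\r')
def pvAltLetter (c : Char) : Bool := c.isAlpha

def is_symbol_or_digit_only_alt (text : String) : Bool :=
  let st := text.toList.foldl
    (fun (p : Bool × Bool) c => (p.1 || !pvAltWc c, p.2 || pvAltLetter c))
    (false, false)
  st.1 && !st.2

-- ===== PRECONDITION & SPEC =====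
def Spec_is_symbol_or_digit_only (text : String) (out : Bool) : Prop := out = is_symbol_or_digit_only_alt text
instance (text : String) (out : Bool) : Decidable (Spec_is_symbol_or_digit_only text out) := by unfold Spec_is_symbol_or_digit_only; infer_instance

-- ===== CLAIM (what is proved, stated in full; the proofs are below) =====
def Claim_equal_is_symbol_or_digit_only : Prop := ∀ (text : String), Dom_is_symbol_or_digit_only text → Spec_is_symbol_or_digit_only text (is_symbol_or_digit_only text)

-- ===== LEMMAS AND PROOFS =====
theorem pvWcLoop_eq_all (l : List Char) : pvWcLoop l = l.all (fun c => pvCatZ c || pvCatC c) := by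
  induction l with
  | nil => rfl
  | cons c rest ih =>
    simp only [pvWcLoop, List.all_cons, ih]
    cases h : (pvCatZ c || pvCatC c) <;> simp

theorem pvLetterLoop_eq_any (l : List Char) : pvLetterLoop l = !(l.any pvCatL) := by
  induction l with
  | nil => rfl
  | cons c rest ih =>
    simp only [pvLetterLoop, List.any_cons, ih]
    cases h : pvCatL c <;> simp

theorem pvFoldl_eq (l : List Char) (a b : Bool) :
    l.foldl (fun (p : Bool × Bool) c => (p.1 || !pvAltWc c, p.2 || pvAltLetter c)) (a, b)
      = (a || l.any (fun c => !pvAltWc c), b || l.any pvAltLetter) := by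
  induction l generalizing a b with
  | nil => simp
  | cons c rest ih =>
    simp only [List.foldl_cons, List.any_cons, ih]
    simp [Bool.or_assoc]

theorem pvAltWc_eq (c : Char) : pvAltWc c = (pvCatZ c || pvCatC c) := rfl

theorem pvAltLetter_eq : pvAltLetter = pvCatL := rfl

theorem pvAlt_characterization (text : String) :
    is_symbol_or_digit_only_alt text
      = ((text.toList.any fun c => !pvAltWc c) && !(text.toList.any pvAltLetter)) := by
  simp only [is_symbol_or_digit_only_alt, pvFoldl_eq, Bool.false_or]

theorem pvAll_eq_not_any (l : List Char) :
    (l.all fun c => pvCatZ c || pvCatC c) = !(l.any fun c => !pvAltWc c) := by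
  cases h : l.any (fun c => !pvAltWc c)
  · simp only [List.any_eq_false] at h
    simp only [Bool.not_false]
    rw [List.all_eq_true]
    intro c hc
    have h2 : pvAltWc c = true := by simpa using h c hc
    rw [← pvAltWc_eq]
    exact h2
  · simp only [List.any_eq_true] at h
    obtain ⟨c, hc, hnc⟩ := h
    simp only [Bool.not_true]
    refine List.all_eq_false.mpr ⟨c, hc, ?_⟩
    rw [pvAltWc_eq] at hnc
    simpa using hnc

-- ===== VERDICT (by name: the statement is the Claim_ definition above) =====
theorem is_symbol_or_digit_only_spec : Claim_equal_is_symbol_or_digit_only := by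
  intro text _
  unfold Spec_is_symbol_or_digit_only
  rw [pvAlt_characterization]
  unfold is_symbol_or_digit_only pv_is_whitespace_or_control_only
  by_cases h : text = ""
  · subst h; simp
  · simp only [h, if_false, pvWcLoop_eq_all, pvAll_eq_not_any]
    cases hany : text.toList.any (fun c => !pvAltWc c)
    · simp
    · simp [pvLetterLoop_eq_any, pvAltLetter_eq]
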